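-- pv_equiv track=rewrite | github.com/pomtom44/GlanceRF_Dev | glancerf/config/settings.py | resize_layout_to_grid
-- ===== SOURCE A (Python) =====
-- def resize_layout_to_grid(layout: list, grid_columns: int, grid_rows: int) -> list:
--     """Resize layout to exactly grid_rows x grid_columns, preserving existing cells."""
--     result = []
--     for row in range(grid_rows):
--         result_row = []
--         for col in range(grid_columns):
--             if layout and row < len(layout) and col < len(layout[row]):
--                 result_row.append(layout[row][col] if isinstance(layout[row][col], str) else "")
--             else:
--                 result_row.append("")
--         result.append(result_row)
--     return result
-- ===== SOURCE B (Python) =====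
-- def resize_layout_to_grid(layout: list, grid_columns: int, grid_rows: int) -> list:
--     """Resize layout to exactly grid_rows x grid_columns by slicing and padding each row."""
--     rows = max(grid_rows, 0)
--     cols = max(grid_columns, 0)
--     result = []
--     for r in range(rows):
--         row = list(layout[r][:cols]) if r < len(layout) else []
--         result.append(row + [""] * (cols - len(row)))
--     return result
-- ===== Notes on version B (the rewrite author's own statement) =====
-- stated objective: simpler
-- what changed: Replaces A's uniform nested per-cell loop with in-bounds guards by a per-row slice-and-pad: each output row is the clipped source row (if any) plus the needed padding of empty strings.
import Mathlib
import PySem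

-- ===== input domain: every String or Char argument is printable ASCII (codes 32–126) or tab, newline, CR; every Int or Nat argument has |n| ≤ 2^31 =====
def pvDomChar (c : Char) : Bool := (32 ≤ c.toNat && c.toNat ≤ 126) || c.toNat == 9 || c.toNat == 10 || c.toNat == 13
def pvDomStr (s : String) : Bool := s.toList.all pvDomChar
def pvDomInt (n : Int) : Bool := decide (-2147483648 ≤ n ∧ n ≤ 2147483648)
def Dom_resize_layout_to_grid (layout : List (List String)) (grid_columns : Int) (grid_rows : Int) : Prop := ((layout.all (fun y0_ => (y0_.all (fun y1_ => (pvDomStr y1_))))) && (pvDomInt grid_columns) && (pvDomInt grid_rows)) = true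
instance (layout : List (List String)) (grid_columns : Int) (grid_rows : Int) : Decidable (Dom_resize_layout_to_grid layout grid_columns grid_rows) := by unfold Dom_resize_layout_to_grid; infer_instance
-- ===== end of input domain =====

-- ===== PORT A =====
-- B: per-row slice-and-pad instead of A's per-cell guarded nested loop (same cost; simpler decomposition)
def resize_layout_to_grid (layout : List (List String)) (grid_columns : Int) (grid_rows : Int) : List (List String) :=
  (PySem.List.pyRange 0 grid_rows 1).foldl (fun result row =>
    result ++ [(PySem.List.pyRange 0 grid_columns 1).foldl (fun result_row col =>
      if layout ≠ [] ∧ row < (layout.length : Int) ∧ col < ((PySem.List.pyGetD layout row []).length : Int) then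
        -- the isinstance(·, str) check is always true on List (List String); the cell is appended as-is
        result_row ++ [PySem.List.pyGetD (PySem.List.pyGetD layout row []) col ""]
      else
        result_row ++ [""]) []]) []

-- ===== PORT B =====
def resize_layout_to_grid_alt (layout : List (List String)) (grid_columns : Int) (grid_rows : Int) : List (List String) :=
  let cols := (max grid_columns 0).toNat
  (List.range (max grid_rows 0).toNat).map (fun r =>
    let row := if r < layout.length then (layout.getD r []).take cols else []
    row ++ List.replicate (cols - row.length) "")

-- ===== PRECONDITION & SPEC =====
def Spec_resize_layout_to_grid (layout : List (List String)) (grid_columns : Int) (grid_rows : Int) (out : List (List String)) : Prop := out = resize_layout_to_grid_alt layout grid_columns grid_rows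
instance (layout : List (List String)) (grid_columns : Int) (grid_rows : Int) (out : List (List String)) : Decidable (Spec_resize_layout_to_grid layout grid_columns grid_rows out) := by unfold Spec_resize_layout_to_grid; infer_instance

-- ===== CLAIM (what is proved, stated in full; the proofs are below) =====
def Claim_equal_resize_layout_to_grid : Prop := ∀ (layout : List (List String)) (grid_columns : Int) (grid_rows : Int), Dom_resize_layout_to_grid layout grid_columns grid_rows → Spec_resize_layout_to_grid layout grid_columns grid_rows (resize_layout_to_grid layout grid_columns grid_rows)

-- ===== LEMMAS AND PROOFS =====

-- ===== VERDICT (by name: the statement is the Claim_ definition above) =====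

lemma pv_row_eq (layout : List (List String)) (gc : Int) (r : Nat) :
    (PySem.List.pyRange 0 gc 1).foldl (fun result_row col =>
      if layout ≠ [] ∧ (r : Int) < (layout.length : Int) ∧ col < ((PySem.List.pyGetD layout (r : Int) []).length : Int) then
        result_row ++ [PySem.List.pyGetD (PySem.List.pyGetD layout (r : Int) []) col ""]
      else
        result_row ++ [""]) []
    = (let row := if r < layout.length then (layout.getD r []).take (max gc 0).toNat else []
       row ++ List.replicate ((max gc 0).toNat - row.length) "") := by
  have hf : (fun (result_row : List String) (col : Int) =>
      if layout ≠ [] ∧ (r : Int) < (layout.length : Int) ∧ col < ((PySem.List.pyGetD layout (r : Int) []).length : Int) then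
        result_row ++ [PySem.List.pyGetD (PySem.List.pyGetD layout (r : Int) []) col ""]
      else
        result_row ++ [""])
      = (fun result_row col => result_row ++
          [if layout ≠ [] ∧ (r : Int) < (layout.length : Int) ∧ col < ((PySem.List.pyGetD layout (r : Int) []).length : Int)
           then PySem.List.pyGetD (PySem.List.pyGetD layout (r : Int) []) col "" else ""]) := by
    funext acc col; split_ifs <;> rfl
  rw [hf, PySem.List.foldl_append_singleton_eq_map, List.nil_append, PySem.List.pyRange_one]
  rw [List.map_map]
  have hn : (gc - 0).toNat = (max gc 0).toNat := by omega
  simp only [PySem.List.pyGetD_natCast]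
  set rowr := layout.getD r [] with hrowr
  by_cases hr : r < layout.length
  · have hne : layout ≠ [] := List.ne_nil_of_length_pos (by omega)
    have hrI : (r : Int) < (layout.length : Int) := by exact_mod_cast hr
    simp only [if_pos hr]
    apply List.ext_getElem
    · simp; omega
    · intro j hj1 hj2
      simp only [List.length_map, List.length_range] at hj1
      have hjn : j < (max gc 0).toNat := by omega
      simp only [Function.comp, List.getElem_map, List.getElem_range]
      by_cases hjr : j < rowr.length
      · have : ((0:Int) + (j:Int)) < (rowr.length : Int) := by omega
        rw [if_pos ⟨hne, hrI, this⟩]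
        have h1 : ((0:Int) + (j:Int)) = ((j:Nat) : Int) := by ring
        rw [h1, PySem.List.pyGetD_natCast]
        rw [List.getElem_append_left (by simp; omega)]
        simp [List.getD_eq_getElem?_getD]
        simp [List.getElem?_eq_getElem hjr]
      · have : ¬ ((0:Int) + (j:Int)) < (rowr.length : Int) := by omega
        rw [if_neg (by tauto)]
        rw [List.getElem_append_right (by simp; omega)]
        simp
  · have hrowr0 : rowr = [] := by
      rw [hrowr]; exact List.getD_eq_default _ _ (by omega)
    simp only [if_neg hr]
    apply List.ext_getElem
    · simp; omega
    · intro j hj1 hj2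
      simp only [List.length_map, List.length_range] at hj1
      simp only [Function.comp, List.getElem_map, List.getElem_range]
      have hc : ¬ ((0:Int) + (j:Int)) < ((rowr.length : Nat) : Int) := by
        rw [hrowr0]; simp
      rw [if_neg (by tauto)]
      simp

theorem resize_layout_to_grid_spec : Claim_equal_resize_layout_to_grid := by
  intro layout gc gr _
  unfold Spec_resize_layout_to_grid resize_layout_to_grid resize_layout_to_grid_alt
  dsimp only
  rw [PySem.List.foldl_append_singleton_eq_map, List.nil_append,
      PySem.List.pyRange_one 0 gr, List.map_map]
  rw [show (gr - 0).toNat = (max gr 0).toNat from by omega]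
  apply List.map_congr_left
  intro r _
  dsimp only [Function.comp]
  simp only [zero_add]
  exact pv_row_eq layout gc r
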